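-- pv_equiv track=rewrite | github.com/YichengZou626/COMP431_INTERNET-SERVICES-PROTOCOLS | parse.py | is_string
-- ===== SOURCE A (Python) =====
-- def is_string(line):
--     length = 0
--     for i in range(len(line)):
--         if is_char(line[i]):
--             length += 1
--         else:
--             break
--     return length
--
-- def is_char(char):
--     special = ['<', '>', '(', ')', '[', ']', '\\', '.', ',', ';', ':', '@', '"']
--     if char in special or is_sp(char) or char == '\n':
--         return False
--     else:
--         return True
--
-- def is_sp(char):
--     if char == ' ' or char == '\t' or char == '':
--         return True
--     else:
--         return False
-- ===== SOURCE B (Python) =====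
-- import re
--
-- # Negated character class: everything except the 13 special chars, space, tab, newline.
-- # re.match always succeeds (the class is starred), matching the longest valid prefix.
-- _VALID_PREFIX = re.compile(r'[^<>()\[\]\\.,;:@" \t\n]*')
--
-- def is_string(line):
--     return _VALID_PREFIX.match(line).end()
-- ===== Notes on version B (the rewrite author's own statement) =====
-- stated objective: idiomatic
-- what changed: Replaced A's per-character counting loop with is_char/is_sp helper predicates by a single compiled regular expression over a negated character class, returning the end offset of the (always-successful) prefix match; the whole scan runs inside the regex engine with no per-character Python code.
import Mathlib
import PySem

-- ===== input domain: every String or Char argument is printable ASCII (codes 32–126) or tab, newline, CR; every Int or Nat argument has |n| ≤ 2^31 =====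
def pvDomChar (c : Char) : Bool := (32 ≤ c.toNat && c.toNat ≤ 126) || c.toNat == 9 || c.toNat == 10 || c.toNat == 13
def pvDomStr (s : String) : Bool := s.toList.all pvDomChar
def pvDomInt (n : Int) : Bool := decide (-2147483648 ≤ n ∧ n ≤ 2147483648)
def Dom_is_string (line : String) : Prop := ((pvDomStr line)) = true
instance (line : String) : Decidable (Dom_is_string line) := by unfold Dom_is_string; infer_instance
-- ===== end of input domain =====

-- B replaces A's per-character counting loop (with is_char/is_sp helpers) by a regex
-- prefix match over a negated character class (idiomatic; same O(n) cost).


-- ===== PORT A =====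
-- is_sp: the Python branch char == '' can never hold for a single character of a string
def is_sp (c : Char) : Bool := c = ' ' || c = '\t'

def is_char (c : Char) : Bool :=
  if c ∈ ['<', '>', '(', ')', '[', ']', '\\', '.', ',', ';', ':', '@', '"'] || is_sp c || c = '\n'
  then false else true

-- the for-loop with break: count while is_char holds, stop at the first failure
def isStringLoop : List Char → Int → Int
  | [], length => length
  | c :: cs, length => if is_char c then isStringLoop cs (length + 1) else length

def is_string (line : String) : Int := isStringLoop line.toList 0

-- ===== PORT B =====
-- hand port of the regex r'[^<>()\[\]\\.,;:@" \t\n]*' matched at position 0: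
-- the starred negated class matches exactly the longest prefix of characters not in
-- the class, and .end() is that prefix's length (exact for this pattern: a single
-- greedy character class has no backtracking)
def inClass (c : Char) : Bool := c ∈ "<>()[]\\.,;:@\" \t\n".toList

def is_string_alt (line : String) : Int :=
  ((line.toList.takeWhile (fun c => !inClass c)).length : Int)

-- ===== PRECONDITION & SPEC =====
def Spec_is_string (line : String) (out : Int) : Prop := out = is_string_alt line
instance (line : String) (out : Int) : Decidable (Spec_is_string line out) := by unfold Spec_is_string; infer_instance

-- ===== CLAIM (what is proved, stated in full; the proofs are below) =====
def Claim_equal_is_string : Prop := ∀ (line : String), Dom_is_string line → Spec_is_string line (is_string line)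

-- ===== LEMMAS AND PROOFS =====
theorem is_char_eq (c : Char) : is_char c = !inClass c := by
  simp [is_char, is_sp, inClass, Bool.and_assoc, Bool.and_comm, Bool.and_left_comm]

theorem isStringLoop_eq (cs : List Char) (n : Int) :
    isStringLoop cs n = n + ((cs.takeWhile (fun c => !inClass c)).length : Int) := by
  induction cs generalizing n with
  | nil => simp [isStringLoop]
  | cons c cs ih =>
    simp only [isStringLoop, is_char_eq, List.takeWhile]
    by_cases hb : inClass c
    · simp [hb]
    · simp only [hb, Bool.not_false, if_true, ih, List.length_cons]
      push_cast
      ring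

-- ===== VERDICT (by name: the statement is the Claim_ definition above) =====
theorem is_string_spec : Claim_equal_is_string := by
  intro line _
  show is_string line = is_string_alt line
  simp only [is_string, is_string_alt, isStringLoop_eq, zero_add]
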